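-- pv_equiv track=rewrite | github.com/marataj/strf_hint | source/formater.py | split_format_components
-- ===== SOURCE A (Python) =====
-- import string
--
-- def check_string_group(s: str):
--     for name, group in [("digits", string.digits), ("letters", string.ascii_lowercase), ("punctuation", string.punctuation),
--                         ("whitespace", string.whitespace)]:
--         if s in group:
--             return name
--
-- def split_format_components(s: str):
--     s = s.lower()
--     index = []
--     for idx, elem in enumerate(s[1:], 1):
--         if check_string_group(elem) != check_string_group(s[idx-1]):
--             index.append(idx)
--     index.insert(0, 0)
--     index.append(len(s))
--
--     return [s[index[i-1]: index[i]] for i, _ in enumerate(index[1:], 1)]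
-- ===== SOURCE B (Python) =====
-- import string
-- from itertools import groupby
--
--
-- def check_string_group(s: str):
--     for name, group in [("digits", string.digits), ("letters", string.ascii_lowercase),
--                         ("punctuation", string.punctuation), ("whitespace", string.whitespace)]:
--         if s in group:
--             return name
--
--
-- def split_format_components(s: str):
--     return [''.join(g) for _, g in groupby(s.lower(), key=check_string_group)]
-- ===== Notes on version B (the rewrite author's own statement) =====
-- stated objective: idiomatic
-- what changed: B replaces A's two-pass boundary-index computation (enumerate to collect change indices, then slice between consecutive indices) with a single itertools.groupby over the lowercased string that groups adjacent characters of equal category directly.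
-- outside the precondition, e.g. on split_format_components(''): A returns [''], B returns []
import Mathlib
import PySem

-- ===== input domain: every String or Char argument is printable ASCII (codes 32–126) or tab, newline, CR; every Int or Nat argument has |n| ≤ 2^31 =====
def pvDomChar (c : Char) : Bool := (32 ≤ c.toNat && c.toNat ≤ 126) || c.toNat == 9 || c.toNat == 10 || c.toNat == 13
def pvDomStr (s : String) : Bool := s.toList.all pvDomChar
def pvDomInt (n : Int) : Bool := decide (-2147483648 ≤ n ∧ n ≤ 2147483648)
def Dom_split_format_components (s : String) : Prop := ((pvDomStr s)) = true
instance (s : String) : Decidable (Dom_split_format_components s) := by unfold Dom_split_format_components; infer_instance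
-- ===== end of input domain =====

-- B splits the lowercased string into runs of equal character category in a single
-- itertools.groupby-style pass instead of A's boundary-index list plus slicing pass (objective: idiomatic).

-- ===== PORT A =====
-- string.digits / string.ascii_lowercase / string.punctuation / string.whitespace as char lists
def pvGroupsA : List (String × List Char) :=
  [("digits", "0123456789".toList),
   ("letters", "abcdefghijklmnopqrstuvwxyz".toList),
   ("punctuation", "!\"#$%&'()*+,-./:;<=>?@[\\]^_`{|}~".toList),
   ("whitespace", " \t\n\r\x0b\x0c".toList)]

-- check_string_group: the for-loop with early return over the category table; its argument is always a
-- single character here, so Python's substring test `s in group` is membership of that character.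
def check_string_group (c : Char) : Option String :=
  (pvGroupsA.find? (fun g => g.2.contains c)).map (·.1)

-- literal port of A: lowercase, collect boundary indices over enumerate(s[1:], 1), slice between them.
-- Enumeration counters are kept as Nat (always nonnegative positions); `getD` is exact because every
-- access `s[idx-1]` / `index[i-1]` / `index[i]` is in range, and `s[a:b]` with natural 0 ≤ a ≤ b is
-- `(drop a).take (b - a)` (PySem.List.slice_natCast).
def split_format_components (s : String) : List String :=
  let t := (PySem.Str.lower s).toList
  let index0 := ((t.drop 1).zipIdx 1).foldl
      (fun acc p => if check_string_group p.1 ≠ check_string_group (t.getD (p.2 - 1) ' ') then acc ++ [p.2] else acc)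
      ([] : List Nat)
  let index := 0 :: index0 ++ [t.length]
  ((index.drop 1).zipIdx 1).map (fun p =>
    String.ofList ((t.drop (index.getD (p.2 - 1) 0)).take (index.getD p.2 0 - index.getD (p.2 - 1) 0)))

-- ===== PORT B =====
-- Source B's own copy of check_string_group (same table, same loop)
def check_string_group_b (c : Char) : Option String :=
  (pvGroupsA.find? (fun g => g.2.contains c)).map (·.1)

-- itertools.groupby(cs, key=f): maximal runs of adjacent elements with equal key
def pyGroupby (f : Char → Option String) : List Char → List (List Char)
  | [] => []
  | c :: rest =>
      (c :: rest.takeWhile (fun d => f d == f c)) :: pyGroupby f (rest.dropWhile (fun d => f d == f c))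
termination_by l => l.length
decreasing_by
  simp only [List.length_cons]
  exact Nat.lt_succ_of_le (List.length_dropWhile_le _ _)

def split_format_components_alt (s : String) : List String :=
  (pyGroupby check_string_group_b ((PySem.Str.lower s).toList)).map String.ofList

-- ===== PRECONDITION & SPEC =====
-- Pre_ excludes only the empty string, on which A's value [''] and B's [] are both defensible
-- readings of "split into runs" and neither is specified anywhere.
def Pre_split_format_components (s : String) : Prop := s ≠ ""
instance (s : String) : Decidable (Pre_split_format_components s) := by unfold Pre_split_format_components; infer_instance

def pvWitness_split_format_components : String := "Ab1 c,,x"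

def Spec_split_format_components (s : String) (out : List String) : Prop := out = split_format_components_alt s
instance (s : String) (out : List String) : Decidable (Spec_split_format_components s out) := by unfold Spec_split_format_components; infer_instance

-- ===== CLAIM (what is proved, stated in full; the proofs are below) =====
def Claim_equal_split_format_components : Prop := ∀ (s : String), Dom_split_format_components s → Pre_split_format_components s → Spec_split_format_components s (split_format_components s)

-- ===== LEMMAS AND PROOFS =====

-- boundary indices of consecutive unequal-category pairs, position of the first pair = k
def pvBnd : Nat → List Char → List Nat
  | _, [] => []
  | _, [_] => []
  | k, a :: b :: l => (if check_string_group b ≠ check_string_group a then [k] else []) ++ pvBnd (k + 1) (b :: l)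

-- slices of t between consecutive entries of x :: J
def pvAdj (t : List Char) : Nat → List Nat → List String
  | _, [] => []
  | x, y :: J => String.ofList ((t.drop x).take (y - x)) :: pvAdj t y J

-- A's index-collecting foldl equals pvBnd
theorem pvBnd_of_foldl (t : List Char) :
    ∀ (u : List Char) (a : Char) (k : Nat) (acc : List Nat),
    (∀ j, j < u.length → t.getD (k + j - 1) ' ' = (a :: u).getD j ' ') →
    (u.zipIdx k).foldl
      (fun acc p => if check_string_group p.1 ≠ check_string_group (t.getD (p.2 - 1) ' ') then acc ++ [p.2] else acc)
      acc = acc ++ pvBnd k (a :: u) := by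
  intro u
  induction u with
  | nil => intro a k acc _; simp [pvBnd]
  | cons b u' ih =>
    intro a k acc h
    have h0 := h 0 (Nat.succ_pos _)
    simp only [Nat.add_zero, List.getD_cons_zero] at h0
    rw [List.zipIdx_cons, List.foldl_cons]
    have hrec : ∀ j, j < u'.length → t.getD (k + 1 + j - 1) ' ' = (b :: u').getD j ' ' := by
      intro j hj
      have := h (j + 1) (Nat.succ_lt_succ hj)
      rw [show k + (j + 1) - 1 = k + 1 + j - 1 from by omega] at this
      simpa using this
    match u' with
    | [] =>
      simp only [List.zipIdx_nil, List.foldl_nil, pvBnd, h0]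
      split <;> simp
    | c :: u'' =>
      rw [ih b (k + 1) _ hrec]
      show _ = acc ++ pvBnd k (a :: b :: c :: u'')
      simp only [pvBnd, h0]
      split <;> simp

-- A's slicing comprehension equals pvAdj
theorem pvAdj_of_map (t : List Char) (I : List Nat) :
    ∀ (J : List Nat) (x : Nat) (k : Nat),
    (∀ j, j < J.length + 1 → I.getD (k + j - 1) 0 = (x :: J).getD j 0) →
    (J.zipIdx k).map (fun p =>
      String.ofList ((t.drop (I.getD (p.2 - 1) 0)).take (I.getD p.2 0 - I.getD (p.2 - 1) 0)))
      = pvAdj t x J := by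
  intro J
  induction J with
  | nil => intro x k _; simp [pvAdj]
  | cons y J' ih =>
    intro x k h
    have h0 := h 0 (Nat.succ_pos _)
    have h1 := h 1 (Nat.succ_lt_succ (Nat.succ_pos _))
    simp only [Nat.add_zero, List.getD_cons_zero] at h0
    have h1' : I.getD k 0 = y := by simpa using h1
    rw [List.zipIdx_cons, List.map_cons]
    simp only [pvAdj]
    congr 1
    · rw [h0, h1']
    · apply ih y (k + 1)
      intro j hj
      have := h (j + 1) (Nat.succ_lt_succ hj)
      rw [show k + (j + 1) - 1 = k + 1 + j - 1 from by omega] at this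
      simpa using this

-- pvBnd shifts by a constant
theorem pvBnd_shift (m : Nat) : ∀ (u : List Char) (k : Nat), pvBnd (k + m) u = (pvBnd k u).map (· + m) := by
  intro u
  induction u with
  | nil => intro k; simp [pvBnd]
  | cons b u' ih =>
    intro k
    match u' with
    | [] => simp [pvBnd]
    | c :: u'' =>
      simp only [pvBnd, List.map_append]
      congr 1
      · split <;> simp
      · have := ih (k + 1)
        rw [Nat.add_right_comm] at this
        exact this

-- pvAdj over a shifted index list on t₁ ++ t₂ reduces to pvAdj on t₂
theorem pvAdj_shift (t₁ t₂ : List Char) :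
    ∀ (L : List Nat) (x : Nat),
    pvAdj (t₁ ++ t₂) (x + t₁.length) (L.map (· + t₁.length)) = pvAdj t₂ x L := by
  intro L
  induction L with
  | nil => intro x; simp [pvAdj]
  | cons y L' ih =>
    intro x
    simp only [List.map_cons]
    simp only [pvAdj]
    congr 1
    · have hd : (t₁ ++ t₂).drop (x + t₁.length) = t₂.drop x := by
        rw [List.drop_append]
        have h1 : t₁.drop (x + t₁.length) = [] := List.drop_eq_nil_of_le (by omega)
        have h2 : x + t₁.length - t₁.length = x := by omega
        rw [h1, h2]; simp
      rw [hd, show y + t₁.length - (x + t₁.length) = y - x from by omega]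
    · exact ih y

-- pvBnd over a run of equal categories followed by the rest
theorem pvBnd_run :
    ∀ (w : List Char) (c : Char) (u : List Char) (k : Nat),
    (∀ d ∈ w, check_string_group d = check_string_group c) →
    (∀ x, u.head? = some x → check_string_group x ≠ check_string_group c) →
    pvBnd k (c :: (w ++ u)) =
      (if u = [] then [] else (k + w.length) :: pvBnd (k + w.length + 1) u) := by
  intro w
  induction w with
  | nil =>
    intro c u k _ hu
    match u with
    | [] => simp [pvBnd]
    | x :: u' =>
      have hx := hu x rfl
      simp only [List.nil_append, List.length_nil, Nat.add_zero, pvBnd, if_pos hx,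
        if_neg (List.cons_ne_nil x u'), List.singleton_append]
  | cons d w' ih =>
    intro c u k hw hu
    have hd : check_string_group d = check_string_group c := hw d (by simp)
    have hw' : ∀ e ∈ w', check_string_group e = check_string_group d := by
      intro e he; rw [hw e (by simp [he]), hd]
    have hu' : ∀ x, u.head? = some x → check_string_group x ≠ check_string_group d := by
      intro x hx; rw [hd]; exact hu x hx
    show pvBnd k (c :: d :: (w' ++ u)) = _
    simp only [pvBnd, if_neg (by simp [hd] : ¬ check_string_group d ≠ check_string_group c), List.nil_append]
    rw [ih d u (k + 1) hw' hu']
    simp only [List.length_cons]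
    rw [show k + 1 + w'.length = k + (w'.length + 1) from by omega]

-- the two check helpers are the same function
theorem check_eq : check_string_group_b = check_string_group := rfl

-- first element dropped by dropWhile fails the predicate
theorem pv_head?_dropWhile {α : Type} (p : α → Bool) :
    ∀ (l : List α) (x : α), (l.dropWhile p).head? = some x → p x = false := by
  intro l
  induction l with
  | nil => intro x hx; simp at hx
  | cons a l ih =>
    intro x hx
    by_cases ha : p a = true
    · rw [List.dropWhile_cons_of_pos ha] at hx
      exact ih x hx
    · rw [List.dropWhile_cons_of_neg ha] at hx
      simp only [List.head?_cons, Option.some.injEq] at hx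
      rw [← hx]
      simpa using ha

-- core equivalence on char lists: A's boundary/slice form equals B's groupby form
theorem pv_core : ∀ (n : Nat) (t : List Char), t.length ≤ n → t ≠ [] →
    pvAdj t 0 (pvBnd 1 t ++ [t.length]) = (pyGroupby check_string_group t).map String.ofList := by
  intro n
  induction n with
  | zero =>
    intro t ht hne
    match t, hne with
    | c :: r, _ => simp at ht
  | succ n ih =>
    intro t ht hne
    match t, hne with
    | c :: rest, _ =>
      simp only [List.length_cons] at ht
      rw [pyGroupby]
      obtain ⟨w, hW⟩ : ∃ w, rest.takeWhile (fun d => check_string_group d == check_string_group c) = w := ⟨_, rfl⟩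
      obtain ⟨u, hU⟩ : ∃ u, rest.dropWhile (fun d => check_string_group d == check_string_group c) = u := ⟨_, rfl⟩
      rw [hW, hU]
      have hsplit : rest = w ++ u := by rw [← hW, ← hU, List.takeWhile_append_dropWhile]
      have hw : ∀ d ∈ w, check_string_group d = check_string_group c := by
        intro d hd
        have : d ∈ rest.takeWhile (fun d => check_string_group d == check_string_group c) := hW ▸ hd
        have := List.mem_takeWhile_imp this
        simpa using this
      have hu : ∀ x, u.head? = some x → check_string_group x ≠ check_string_group c := by
        intro x hx
        have := pv_head?_dropWhile (fun d => check_string_group d == check_string_group c) rest x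
          (by rw [hU]; exact hx)
        simpa using this
      have hulen : u.length ≤ rest.length := by
        rw [← hU]; exact List.length_dropWhile_le _ _
      rw [hsplit, pvBnd_run w c u 1 hw hu]
      by_cases hcu : u = []
      · subst hcu
        rw [pyGroupby]
        simp [pvAdj]
      · rw [if_neg hcu, List.cons_append]
        simp only [pvAdj, List.map_cons]
        congr 1
        · -- first run: s[0 : 1 + |w|] = c :: w
          simp only [List.drop_zero, Nat.sub_zero]
          rw [show 1 + w.length = w.length + 1 from by omega, List.take_succ_cons,
            List.take_left' rfl]
        · -- remaining runs: shift by the first run's length and use the IH on u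
          have hm := pvAdj_shift (c :: w) u (pvBnd 1 u ++ [u.length]) 0
          simp only [List.length_cons, Nat.zero_add, List.map_append, List.map_cons,
            List.map_nil] at hm
          have hlu : u.length ≤ n := by
            rw [hsplit] at ht
            simp only [List.length_append] at ht
            omega
          rw [show c :: (w ++ u) = (c :: w) ++ u from rfl]
          rw [show (1 : Nat) + w.length = w.length + 1 from by omega]
          rw [show w.length + 1 + 1 = 1 + (w.length + 1) from by omega]
          rw [pvBnd_shift (w.length + 1) u 1]
          have hlen : ((c :: w) ++ u).length = u.length + (w.length + 1) := by
            simp only [List.length_append, List.length_cons]; omega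
          rw [hlen, hm, ih u hlu hcu]

-- A unfolded into pvAdj/pvBnd form
theorem pvA_eq (s : String) (t : List Char) (h : (PySem.Str.lower s).toList = t) (hne : t ≠ []) :
    split_format_components s = pvAdj t 0 (pvBnd 1 t ++ [t.length]) := by
  simp only [split_format_components, h]
  match t, hne with
  | c :: rest, _ =>
    have hyp : ∀ j, j < rest.length → (c :: rest).getD (1 + j - 1) ' ' = (c :: rest).getD j ' ' := by
      intro j hj
      rw [show 1 + j - 1 = j from by omega]
    have hb := pvBnd_of_foldl (c :: rest) rest c 1 [] hyp
    rw [List.nil_append] at hb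
    simp only [List.drop_one, List.tail_cons]
    rw [hb]
    have hyp2 : ∀ j, j < (pvBnd 1 (c :: rest) ++ [(c :: rest).length]).length + 1 →
        (0 :: (pvBnd 1 (c :: rest) ++ [(c :: rest).length])).getD (1 + j - 1) 0
          = (0 :: (pvBnd 1 (c :: rest) ++ [(c :: rest).length])).getD j 0 := by
      intro j hj
      rw [show 1 + j - 1 = j from by omega]
    exact pvAdj_of_map (c :: rest) (0 :: (pvBnd 1 (c :: rest) ++ [(c :: rest).length]))
      (pvBnd 1 (c :: rest) ++ [(c :: rest).length]) 0 1 hyp2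

-- ===== VERDICT (by name: the statement is the Claim_ definition above) =====
theorem split_format_components_spec : Claim_equal_split_format_components := by
  intro s _ hpre
  unfold Spec_split_format_components split_format_components_alt
  have hne : ((PySem.Str.lower s).toList) ≠ [] := by
    rw [PySem.Str.toList_lower]
    intro h
    apply hpre
    rw [← String.toList_eq_nil_iff]
    cases hli : s.toList with
    | nil => rfl
    | cons a l =>
      rw [hli] at h
      simp [PySem.Chars.lower] at h
  rw [pvA_eq s ((PySem.Str.lower s).toList) rfl hne, check_eq]
  exact pv_core ((PySem.Str.lower s).toList).length _ le_rfl hne
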